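-- pv_equiv track=rewrite | github.com/mmfoodchicks/Jim | QuietRiftEnigma/Tools/EditorScripts/qr_assign_fab_materials.py | _pick_material
-- ===== SOURCE A (Python) =====
-- PREFIX_KEYWORDS = {
--     # Weapons + attachments — gun metal, scope plastic.
--     "WPN": [["rifle", "gun", "weapon", "firearm"], ["metal", "steel", "gunmetal"], ["industrial"]],
--     "ATT": [["scope", "optic", "rail", "attachment"], ["metal", "steel"], ["plastic"]],
--
--     # Buildings / walls — concrete + panel.
--     "BLD": [["wall", "concrete", "panel", "construction"], ["metal", "steel"], ["industrial"]],
--     "STR": [["wall", "concrete", "panel", "construction"], ["metal", "steel"]],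
--
--     # Crafting stations — industrial machines, computer consoles.
--     "STN": [["console", "industrial", "machine", "computer"], ["metal", "panel", "tech"]],
--     "STA": [["console", "industrial", "machine"], ["metal", "panel"]],
--
--     # Trees + flora.
--     "TRE": [["bark", "trunk", "tree"], ["wood"]],
--     "FLO": [["leaf", "plant", "foliage", "moss", "grass"], ["bark", "wood"]],
--     "PLT": [["leaf", "plant", "foliage", "moss"], ["grass"]],
--
--     # Food (fruit / berry / produce / meat).
--     "FOD": [["fruit", "berry", "produce", "vegetable", "food"], ["meat", "flesh"], ["leaf"]],
--
--     # Medicine (clean white plastic / glass).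
--     "MED": [["plastic", "medical", "white", "bottle"], ["glass", "clean"]],
--
--     # Wildlife / animals — skin / fur / hide / scale.
--     "ANM": [["skin", "flesh", "creature", "fur", "hide", "scale"], ["leather"]],
--     "WLD": [["skin", "flesh", "creature", "fur", "hide"], ["leather"]],
--
--     # Tools / handheld — metal + wood handles.
--     "TOL": [["tool", "metal", "handle"], ["wood", "steel"]],
--     "HND": [["handle", "metal", "wood"], ["leather"]],
--
--     # Resources / raw materials.
--     "RAW": [["wood", "rock", "stone", "ore"], ["crate"]],
--
--     # POI clutter / props.
--     "POI": [["crate", "barrel", "box"], ["wood", "metal"]],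
--     "PRP": [["crate", "barrel", "box"], ["wood", "metal"]],
--
--     # Rigs / packs / backpacks.
--     "RIG": [["fabric", "cloth", "leather", "pack"], ["metal"]],
--     "PCK": [["fabric", "cloth", "leather"], ["pack"]],
--
--     # Cosmetic clothing.
--     "CSM": [["cloth", "fabric", "leather"], ["wool", "linen"]],
--     "CLT": [["cloth", "fabric", "leather"], ["wool"]],
--
--     # Remnant / alien artifacts — emissive sci-fi.
--     "REM": [["sci", "alien", "glow", "emissive", "energy"], ["console", "tech", "panel"]],
--     "ART": [["alien", "glow", "emissive", "energy"], ["metal", "console"]],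
--
--     # Vanguard faction / military outposts.
--     "VAN": [["military", "armor", "tactical"], ["metal", "steel"], ["industrial"]],
--     "OUT": [["military", "armor", "tactical"], ["metal", "steel"]],
-- }
--
-- DEFAULT_FALLBACK_KEYWORD = "metal"  # if nothing else fits, give it a metal mat
--
-- def _pick_material(prefix, fab_materials):
--     """Pick the best-matching Fab material for the given prefix. Returns
--     object_path string or None."""
--     keyword_tiers = PREFIX_KEYWORDS.get(prefix, [[DEFAULT_FALLBACK_KEYWORD]])
--     for tier in keyword_tiers:
--         for path, lname in fab_materials:
--             if any(kw in lname for kw in tier):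
--                 return path
--     # Final fallback: any metal material at all.
--     for path, lname in fab_materials:
--         if DEFAULT_FALLBACK_KEYWORD in lname:
--             return path
--     return None
-- ===== SOURCE B (Python) =====
-- # Keyword table kept compactly: one "PREFIX:kw kw ...|kw ..." string per entry
-- # ('|' separates tiers, ' ' separates keywords), parsed once at import.
-- _TABLE = [
--     "WPN:rifle gun weapon firearm|metal steel gunmetal|industrial",
--     "ATT:scope optic rail attachment|metal steel|plastic",
--     "BLD:wall concrete panel construction|metal steel|industrial",
--     "STR:wall concrete panel construction|metal steel",
--     "STN:console industrial machine computer|metal panel tech",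
--     "STA:console industrial machine|metal panel",
--     "TRE:bark trunk tree|wood",
--     "FLO:leaf plant foliage moss grass|bark wood",
--     "PLT:leaf plant foliage moss|grass",
--     "FOD:fruit berry produce vegetable food|meat flesh|leaf",
--     "MED:plastic medical white bottle|glass clean",
--     "ANM:skin flesh creature fur hide scale|leather",
--     "WLD:skin flesh creature fur hide|leather",
--     "TOL:tool metal handle|wood steel",
--     "HND:handle metal wood|leather",
--     "RAW:wood rock stone ore|crate",
--     "POI:crate barrel box|wood metal",
--     "PRP:crate barrel box|wood metal",
--     "RIG:fabric cloth leather pack|metal",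
--     "PCK:fabric cloth leather|pack",
--     "CSM:cloth fabric leather|wool linen",
--     "CLT:cloth fabric leather|wool",
--     "REM:sci alien glow emissive energy|console tech panel",
--     "ART:alien glow emissive energy|metal console",
--     "VAN:military armor tactical|metal steel|industrial",
--     "OUT:military armor tactical|metal steel",
-- ]
--
-- _LADDERS = {}
-- for _row in _TABLE:
--     _pieces = _row.split(":")
--     _LADDERS[_pieces[0]] = [_chunk.split(" ") for _chunk in _pieces[1].split("|")]
--
--
-- def _pick_material(prefix, fab_materials):
--     """Single pass over the materials: rank each by the first ladder rung
--     (tier) it matches — the fallback 'metal' appended as the last rung —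
--     and keep the lowest-ranked, earliest one."""
--     ladder = _LADDERS.get(prefix, [["metal"]]) + [["metal"]]
--     lead = len(ladder)
--     pick = None
--     for loc, label in fab_materials:
--         rung = 0
--         while rung < lead and not any(kw in label for kw in ladder[rung]):
--             rung += 1
--         if rung < lead:
--             lead = rung
--             pick = loc
--     return pick
-- ===== Notes on version B (the rewrite author's own statement) =====
-- stated objective: alternative
-- what changed: A rescans the whole material list once per keyword tier plus a separate fallback loop; B appends the fallback keyword as a last tier and makes a single pass over the materials, ranking each by its first matching tier (the rank search bounded by the best rank so far) and keeping the lowest-ranked earliest one, over a keyword table stored as compact per-prefix strings parsed once at build time.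
import Mathlib
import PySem

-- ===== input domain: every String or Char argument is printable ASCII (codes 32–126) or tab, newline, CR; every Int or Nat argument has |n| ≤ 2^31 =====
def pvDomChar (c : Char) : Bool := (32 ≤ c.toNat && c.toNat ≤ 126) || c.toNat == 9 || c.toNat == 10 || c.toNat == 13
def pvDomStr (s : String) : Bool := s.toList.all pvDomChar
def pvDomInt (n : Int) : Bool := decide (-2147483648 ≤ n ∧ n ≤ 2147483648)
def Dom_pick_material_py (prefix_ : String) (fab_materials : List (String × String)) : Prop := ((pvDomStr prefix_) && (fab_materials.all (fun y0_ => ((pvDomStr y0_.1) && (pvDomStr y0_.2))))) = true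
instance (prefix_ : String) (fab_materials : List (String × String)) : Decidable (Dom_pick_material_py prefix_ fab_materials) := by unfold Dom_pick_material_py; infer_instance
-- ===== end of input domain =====

-- B replaces A's tier-by-tier rescans of the material list with one pass over the
-- materials keeping the lowest-ranked match, its rank search bounded by the best rank
-- so far, over a keyword table kept as compact per-prefix strings parsed once at
-- build time (alternative decomposition; same cost class on inputs of this size).

-- ===== PORT A =====
-- the module constant PREFIX_KEYWORDS of A
def pvPrefixKeywords : PySem.Dict String (List (List String)) :=
  PySem.Dict.ofList [
    ("WPN", [["rifle", "gun", "weapon", "firearm"], ["metal", "steel", "gunmetal"], ["industrial"]]),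
    ("ATT", [["scope", "optic", "rail", "attachment"], ["metal", "steel"], ["plastic"]]),
    ("BLD", [["wall", "concrete", "panel", "construction"], ["metal", "steel"], ["industrial"]]),
    ("STR", [["wall", "concrete", "panel", "construction"], ["metal", "steel"]]),
    ("STN", [["console", "industrial", "machine", "computer"], ["metal", "panel", "tech"]]),
    ("STA", [["console", "industrial", "machine"], ["metal", "panel"]]),
    ("TRE", [["bark", "trunk", "tree"], ["wood"]]),
    ("FLO", [["leaf", "plant", "foliage", "moss", "grass"], ["bark", "wood"]]),
    ("PLT", [["leaf", "plant", "foliage", "moss"], ["grass"]]),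
    ("FOD", [["fruit", "berry", "produce", "vegetable", "food"], ["meat", "flesh"], ["leaf"]]),
    ("MED", [["plastic", "medical", "white", "bottle"], ["glass", "clean"]]),
    ("ANM", [["skin", "flesh", "creature", "fur", "hide", "scale"], ["leather"]]),
    ("WLD", [["skin", "flesh", "creature", "fur", "hide"], ["leather"]]),
    ("TOL", [["tool", "metal", "handle"], ["wood", "steel"]]),
    ("HND", [["handle", "metal", "wood"], ["leather"]]),
    ("RAW", [["wood", "rock", "stone", "ore"], ["crate"]]),
    ("POI", [["crate", "barrel", "box"], ["wood", "metal"]]),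
    ("PRP", [["crate", "barrel", "box"], ["wood", "metal"]]),
    ("RIG", [["fabric", "cloth", "leather", "pack"], ["metal"]]),
    ("PCK", [["fabric", "cloth", "leather"], ["pack"]]),
    ("CSM", [["cloth", "fabric", "leather"], ["wool", "linen"]]),
    ("CLT", [["cloth", "fabric", "leather"], ["wool"]]),
    ("REM", [["sci", "alien", "glow", "emissive", "energy"], ["console", "tech", "panel"]]),
    ("ART", [["alien", "glow", "emissive", "energy"], ["metal", "console"]]),
    ("VAN", [["military", "armor", "tactical"], ["metal", "steel"], ["industrial"]]),
    ("OUT", [["military", "armor", "tactical"], ["metal", "steel"]])]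

-- inner loop of A: first material whose lname contains some keyword of the tier
def pvFindMatch (tier : List String) : List (String × String) → Option String
  | [] => none
  | (path, lname) :: rest =>
    if tier.any (fun kw => PySem.Str.isIn kw lname) then some path
    else pvFindMatch tier rest

-- outer loop of A over the tiers
def pvTierLoop (tiers : List (List String)) (fab_materials : List (String × String)) : Option String :=
  match tiers with
  | [] => none
  | t :: rest =>
    match pvFindMatch t fab_materials with
    | some p => some p
    | none => pvTierLoop rest fab_materials

-- A's final fallback loop: any "metal" material at all
def pvFindMetal : List (String × String) → Option String
  | [] => none
  | (path, lname) :: rest =>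
    if PySem.Str.isIn "metal" lname then some path else pvFindMetal rest

def pick_material_py (prefix_ : String) (fab_materials : List (String × String)) : Option String :=
  let keyword_tiers := pvPrefixKeywords.getD prefix_ [["metal"]]
  match pvTierLoop keyword_tiers fab_materials with
  | some p => some p
  | none => pvFindMetal fab_materials

-- ===== PORT B =====
-- B's module constant _TABLE: one "PREFIX:kw kw ...|kw ..." string per entry
def pvRawRows : List String := [
  "WPN:rifle gun weapon firearm|metal steel gunmetal|industrial",
  "ATT:scope optic rail attachment|metal steel|plastic",
  "BLD:wall concrete panel construction|metal steel|industrial",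
  "STR:wall concrete panel construction|metal steel",
  "STN:console industrial machine computer|metal panel tech",
  "STA:console industrial machine|metal panel",
  "TRE:bark trunk tree|wood",
  "FLO:leaf plant foliage moss grass|bark wood",
  "PLT:leaf plant foliage moss|grass",
  "FOD:fruit berry produce vegetable food|meat flesh|leaf",
  "MED:plastic medical white bottle|glass clean",
  "ANM:skin flesh creature fur hide scale|leather",
  "WLD:skin flesh creature fur hide|leather",
  "TOL:tool metal handle|wood steel",
  "HND:handle metal wood|leather",
  "RAW:wood rock stone ore|crate",
  "POI:crate barrel box|wood metal",
  "PRP:crate barrel box|wood metal",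
  "RIG:fabric cloth leather pack|metal",
  "PCK:fabric cloth leather|pack",
  "CSM:cloth fabric leather|wool linen",
  "CLT:cloth fabric leather|wool",
  "REM:sci alien glow emissive energy|console tech panel",
  "ART:alien glow emissive energy|metal console",
  "VAN:military armor tactical|metal steel|industrial",
  "OUT:military armor tactical|metal steel"]

-- Source B's module-level parse loop building _LADDERS (split? with a nonempty separator
-- is Python's str.split and always returns a list, hence the .getD []; every row has
-- exactly one ':', so pieces has the two indexed parts)
def pvLadders : PySem.Dict String (List (List String)) :=
  pvRawRows.foldl (fun acc row =>
    let pieces := (PySem.Str.split? row ":").getD []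
    acc.insert (pieces.getD 0 "")
      (((PySem.Str.split? (pieces.getD 1 "") "|").getD []).map
        (fun chunk => (PySem.Str.split? chunk " ").getD []))) PySem.Dict.empty

-- Source B's while loop: advance rung until it reaches lead or hits a rung matching label
-- (ladder[rung] read with getD: the loop only reads indices below lead ≤ len(ladder))
def pvRungFrom (ladder : List (List String)) (label : String) (rung lead : Nat) : Nat :=
  if _h : rung < lead then
    if (ladder.getD rung []).any (fun kw => PySem.Str.isIn kw label) then rung
    else pvRungFrom ladder label (rung + 1) lead
  else rung
termination_by lead - rung

-- Source B's single pass over the materials, carrying (lead, pick)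
def pvSweep (ladder : List (List String)) (lead : Nat) (pick : Option String) :
    List (String × String) → Option String
  | [] => pick
  | (loc, label) :: remaining =>
    let rung := pvRungFrom ladder label 0 lead
    if rung < lead then pvSweep ladder rung (some loc) remaining
    else pvSweep ladder lead pick remaining

def pick_material_py_alt (prefix_ : String) (fab_materials : List (String × String)) : Option String :=
  let ladder := pvLadders.getD prefix_ [["metal"]] ++ [["metal"]]
  pvSweep ladder ladder.length none fab_materials

-- ===== PRECONDITION & SPEC =====
def Spec_pick_material_py (prefix_ : String) (fab_materials : List (String × String)) (out : Option String) : Prop := out = pick_material_py_alt prefix_ fab_materials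
instance (prefix_ : String) (fab_materials : List (String × String)) (out : Option String) : Decidable (Spec_pick_material_py prefix_ fab_materials out) := by unfold Spec_pick_material_py; infer_instance

-- ===== CLAIM (what is proved, stated in full; the proofs are below) =====
def Claim_equal_pick_material_py : Prop := ∀ (prefix_ : String) (fab_materials : List (String × String)), Dom_pick_material_py prefix_ fab_materials → Spec_pick_material_py prefix_ fab_materials (pick_material_py prefix_ fab_materials)

-- ===== LEMMAS AND PROOFS =====

-- B's parsed compact table is exactly A's PREFIX_KEYWORDS
theorem pvTable_eq : pvLadders = pvPrefixKeywords := by rfl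

-- rank of a material = index of the first tier whose keywords match its lname
def pvRank (tiers : List (List String)) (lname : String) : Option Nat :=
  tiers.findIdx? (fun t => t.any (fun kw => PySem.Str.isIn kw lname))

-- best-of-two candidates: smaller rank wins, the left (earlier) on a tie
def pvMerge : Option (Nat × String) → Option (Nat × String) → Option (Nat × String)
  | none, b => b
  | some a, none => some a
  | some a, some b => if b.1 < a.1 then some b else some a

-- the minimum-rank candidate of a material list, combined left to right
def pvBestOf (tiers : List (List String)) : List (String × String) → Option (Nat × String)
  | [] => none
  | pl :: rest => pvMerge ((pvRank tiers pl.2).map (fun r => (r, pl.1))) (pvBestOf tiers rest)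

theorem pvMerge_none_right (a : Option (Nat × String)) : pvMerge a none = a := by
  cases a <;> rfl

theorem pvMerge_assoc (a b c : Option (Nat × String)) :
    pvMerge (pvMerge a b) c = pvMerge a (pvMerge b c) := by
  rcases a with _ | ⟨na, sa⟩ <;> rcases b with _ | ⟨nb, sb⟩ <;> rcases c with _ | ⟨nc, sc⟩ <;>
    try rfl
  all_goals simp only [pvMerge]; split_ifs <;> (try simp only [pvMerge]) <;> (try split_ifs) <;>
    first | rfl | (exfalso; omega)

-- the while loop finds the first matching tier index in [r, bestRank), else bestRank
theorem pvRungFrom_spec (tiers : List (List String)) (lname : String) :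
    ∀ r bestRank, r ≤ bestRank → bestRank ≤ tiers.length →
    pvRungFrom tiers lname r bestRank =
      match (tiers.drop r).findIdx? (fun t => t.any (fun kw => PySem.Str.isIn kw lname)) with
      | some k => min (r + k) bestRank
      | none => bestRank := by
  intro r bestRank hrb hbl
  induction hn : bestRank - r generalizing r with
  | zero =>
    have hr : r = bestRank := by omega
    subst hr
    rw [pvRungFrom]
    simp only [lt_irrefl, dite_false]
    cases (tiers.drop r).findIdx? (fun t => t.any (fun kw => PySem.Str.isIn kw lname)) with
    | none => rfl
    | some k => simp
  | succ n ih =>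
    have hlt : r < bestRank := by omega
    have hrl : r < tiers.length := by omega
    have hdrop : tiers.drop r = tiers[r] :: tiers.drop (r + 1) :=
      List.drop_eq_getElem_cons hrl
    have hget : tiers.getD r [] = tiers[r] := List.getD_eq_getElem tiers [] hrl
    rw [pvRungFrom, dif_pos hlt, hget, hdrop, List.findIdx?_cons]
    by_cases hm : ((tiers[r]).any (fun kw => PySem.Str.isIn kw lname)) = true
    · rw [if_pos hm, if_pos hm]
      simp [Nat.min_eq_left (le_of_lt hlt)]
    · rw [if_neg hm, if_neg hm]
      rw [ih (r + 1) (by omega) (by omega)]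
      cases hidx : (tiers.drop (r + 1)).findIdx? (fun t => t.any (fun kw => PySem.Str.isIn kw lname)) with
      | none => simp
      | some k =>
        simp only [Option.map_some]
        have : r + 1 + k = r + (k + 1) := by omega
        rw [this]

-- if a rank exists it is an index into tiers
theorem pvRank_lt_length (tiers : List (List String)) (lname : String) (k : Nat)
    (h : pvRank tiers lname = some k) : k < tiers.length := by
  exact (List.findIdx?_eq_some_iff_findIdx_eq.mp h).1

-- Source B's scan computes the minimum-rank candidate (earliest on ties)
theorem pvSweep_spec (tiers : List (List String)) :
    ∀ (fm : List (String × String)) (bestRank : Nat) (bestPath : Option String),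
    bestRank ≤ tiers.length →
    (bestPath = none → bestRank = tiers.length) →
    pvSweep tiers bestRank bestPath fm =
      (pvMerge (bestPath.map (fun p => (bestRank, p))) (pvBestOf tiers fm)).map Prod.snd := by
  intro fm
  induction fm with
  | nil =>
    intro bestRank bestPath _ _
    rw [pvSweep, pvBestOf, pvMerge_none_right]
    cases bestPath <;> rfl
  | cons pl rest ih =>
    intro bestRank bestPath hle hnone
    obtain ⟨path, lname⟩ := pl
    rw [pvSweep, pvBestOf]
    have hr := pvRungFrom_spec tiers lname 0 bestRank (Nat.zero_le _) hle
    simp only [List.drop_zero, Nat.zero_add] at hr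
    cases hk : pvRank tiers lname with
    | none =>
      unfold pvRank at hk
      rw [hk] at hr
      have hr' : pvRungFrom tiers lname 0 bestRank = bestRank := by simpa using hr
      simp only [hr', lt_irrefl, if_false, Option.map_none]
      rw [ih bestRank bestPath hle hnone]
      rfl
    | some k =>
      unfold pvRank at hk
      rw [hk] at hr
      have hr' : pvRungFrom tiers lname 0 bestRank = min k bestRank := by simpa using hr
      by_cases hklt : k < bestRank
      · have hmin : min k bestRank = k := Nat.min_eq_left (le_of_lt hklt)
        rw [hr', hmin]
        simp only [hklt, if_true]
        rw [ih k (some path) (le_of_lt (lt_of_lt_of_le hklt hle)) (by simp)]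
        simp only [Option.map_some]
        rw [← pvMerge_assoc]
        congr 1
        cases hbp : bestPath with
        | none => rfl
        | some p => simp only [Option.map_some, pvMerge, if_pos hklt]
      · have hmin : min k bestRank = bestRank := Nat.min_eq_right (by omega)
        rw [hr', hmin]
        simp only [lt_irrefl, if_false]
        rw [ih bestRank bestPath hle hnone]
        congr 1
        rw [← pvMerge_assoc]
        congr 1
        cases hbp : bestPath with
        | none =>
          exfalso
          have := hnone hbp
          have := pvRank_lt_length tiers lname k (by unfold pvRank; exact hk)
          omega
        | some p => simp only [Option.map_some, pvMerge, if_neg hklt]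

def pvShift (o : Option (Nat × String)) : Option (Nat × String) :=
  o.map (fun b => (b.1 + 1, b.2))

theorem pvMerge_zero_left (p : String) (b : Option (Nat × String)) :
    pvMerge (some (0, p)) b = some (0, p) := by
  cases b <;> simp [pvMerge]

theorem pvMerge_shift_zero (a : Option (Nat × String)) (p : String) :
    pvMerge (pvShift a) (some (0, p)) = some (0, p) := by
  cases a <;> simp [pvMerge, pvShift]

theorem pvMerge_shift (a b : Option (Nat × String)) :
    pvMerge (pvShift a) (pvShift b) = pvShift (pvMerge a b) := by
  cases a <;> cases b <;> simp only [pvShift, Option.map_some, Option.map_none, pvMerge] <;>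
    first | rfl | (split_ifs <;> first | rfl | (exfalso; omega))

theorem pvRank_cons (t : List String) (rest : List (List String)) (l : String) :
    pvRank (t :: rest) l =
      if t.any (fun kw => PySem.Str.isIn kw l) then some 0
      else (pvRank rest l).map (· + 1) := by
  simp only [pvRank, List.findIdx?_cons]

theorem pvMapShift (o : Option Nat) (p : String) :
    ((o.map (· + 1)).map (fun r => (r, p))) = pvShift (o.map (fun r => (r, p))) := by
  cases o <;> simp [pvShift]

theorem pvBestOf_nil_tiers (fm : List (String × String)) : pvBestOf [] fm = none := by
  induction fm with
  | nil => rfl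
  | cons pl rest ih => simp [pvBestOf, pvRank, ih, pvMerge]

theorem pvBestOf_cons (t : List String) (rest : List (List String)) (fm : List (String × String)) :
    pvBestOf (t :: rest) fm =
      match pvFindMatch t fm with
      | some p => some (0, p)
      | none => pvShift (pvBestOf rest fm) := by
  induction fm with
  | nil => simp [pvBestOf, pvFindMatch, pvShift]
  | cons pl rest' ih =>
    obtain ⟨path, lname⟩ := pl
    by_cases h : t.any (fun kw => PySem.Str.isIn kw lname)
    · simp only [pvBestOf, pvRank_cons, pvFindMatch, if_pos h, Option.map_some]
      exact pvMerge_zero_left path _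
    · simp only [pvBestOf, pvRank_cons, pvFindMatch, if_neg h, ih, pvMapShift]
      cases hf : pvFindMatch t rest' with
      | some p => exact pvMerge_shift_zero _ _
      | none => exact pvMerge_shift _ _

theorem pvShift_snd (o : Option (Nat × String)) :
    (pvShift o).map Prod.snd = o.map Prod.snd := by
  cases o <;> simp [pvShift]

-- core correspondence: the minimum-rank candidate's path equals A's tier-by-tier scan
theorem pvBestOf_eq_tierLoop (tiers : List (List String)) (fm : List (String × String)) :
    (pvBestOf tiers fm).map Prod.snd = pvTierLoop tiers fm := by
  induction tiers with
  | nil => simp [pvBestOf_nil_tiers, pvTierLoop]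
  | cons t rest ih =>
    rw [pvBestOf_cons]
    cases hf : pvFindMatch t fm with
    | some p => simp [pvTierLoop, hf]
    | none => simp [pvTierLoop, hf, pvShift_snd, ih]

-- A's fallback loop is the scan for the singleton tier ["metal"]
theorem pvFindMetal_eq_findMatch (fm : List (String × String)) :
    pvFindMetal fm = pvFindMatch ["metal"] fm := by
  induction fm with
  | nil => rfl
  | cons pl rest ih => obtain ⟨p, l⟩ := pl; simp [pvFindMetal, pvFindMatch, ih]

theorem pvTierLoop_append_singleton (tiers : List (List String)) (t : List String)
    (fm : List (String × String)) :
    pvTierLoop (tiers ++ [t]) fm =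
      match pvTierLoop tiers fm with
      | some p => some p
      | none => pvFindMatch t fm := by
  induction tiers with
  | nil =>
    simp only [List.nil_append, pvTierLoop]
    cases pvFindMatch t fm <;> rfl
  | cons t' rest ih =>
    simp only [List.cons_append, pvTierLoop, ih]
    cases pvFindMatch t' fm <;> rfl

-- ===== VERDICT (by name: the statement is the Claim_ definition above) =====
theorem pick_material_py_spec : Claim_equal_pick_material_py := by
  intro prefix_ fab_materials _
  unfold Spec_pick_material_py pick_material_py pick_material_py_alt
  rw [pvTable_eq]
  set tiers := pvPrefixKeywords.getD prefix_ [["metal"]] with htiers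
  rw [pvSweep_spec (tiers ++ [["metal"]]) fab_materials (tiers ++ [["metal"]]).length none
        (le_refl _) (fun _ => rfl)]
  simp only [Option.map_none]
  rw [show pvMerge none (pvBestOf (tiers ++ [["metal"]]) fab_materials)
        = pvBestOf (tiers ++ [["metal"]]) fab_materials from rfl]
  rw [pvBestOf_eq_tierLoop, pvTierLoop_append_singleton, pvFindMetal_eq_findMatch]
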